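-- pv_equiv track=rewrite | github.com/antenore/voynich-toolkit | src/voynich_toolkit/stolfi_paragraph_test.py | count_gallows_in_words
-- ===== SOURCE A (Python) =====
-- SIMPLE_GALLOWS = {"t", "k", "p", "f"}
--
-- ALL_SPLIT_GALLOWS = {"cth", "ckh", "cph", "cfh"}
--
-- def count_gallows_in_words(words: list[str]) -> dict:
--     """Count simple and split gallows in a word list."""
--     simple = 0
--     split = 0
--     text = ".".join(words)
--     for sg in ALL_SPLIT_GALLOWS:
--         split += text.count(sg)
--     # For simple gallows: count individual chars, excluding those inside split gallows
--     clean = text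
--     for sg in ALL_SPLIT_GALLOWS:
--         clean = clean.replace(sg, "___")
--     for ch in SIMPLE_GALLOWS:
--         simple += clean.count(ch)
--     return {"simple": simple, "split": split, "total_words": len(words)}
-- ===== SOURCE B (Python) =====
-- SIMPLE_GALLOWS = {"t", "k", "p", "f"}
--
-- ALL_SPLIT_GALLOWS = {"cth", "ckh", "cph", "cfh"}
--
-- def count_gallows_in_words(words: list[str]) -> dict:
--     """Count simple and split gallows in a word list (single greedy pass)."""
--     text = ".".join(words)
--     simple = 0
--     split = 0
--     i = 0
--     n = len(text)
--     while i < n: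
--         if text[i:i+3] in ALL_SPLIT_GALLOWS:
--             split += 1
--             i += 3
--         elif text[i] in SIMPLE_GALLOWS:
--             simple += 1
--             i += 1
--         else:
--             i += 1
--     return {"simple": simple, "split": split, "total_words": len(words)}
-- ===== Notes on version B (the rewrite author's own statement) =====
-- stated objective: alternative
-- what changed: A makes nine passes over the joined text (four substring counts, four masking replaces building intermediate strings, then four char counts); B makes a single greedy left-to-right pass that consumes a split gallows (3 chars) or one char at a time, counting both kinds at once with no intermediate strings.
import Mathlib
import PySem

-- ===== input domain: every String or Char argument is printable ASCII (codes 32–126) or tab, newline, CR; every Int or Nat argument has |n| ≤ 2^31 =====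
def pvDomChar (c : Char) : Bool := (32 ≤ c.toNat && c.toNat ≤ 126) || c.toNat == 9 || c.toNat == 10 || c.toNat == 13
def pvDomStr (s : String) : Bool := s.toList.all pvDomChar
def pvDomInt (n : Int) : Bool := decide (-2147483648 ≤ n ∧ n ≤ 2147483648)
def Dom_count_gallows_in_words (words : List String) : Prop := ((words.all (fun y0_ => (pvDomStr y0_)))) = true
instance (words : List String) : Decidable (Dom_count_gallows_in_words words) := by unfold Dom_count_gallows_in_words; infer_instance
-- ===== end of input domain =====

-- B replaces A's nine passes (4 substring counts + 4 masking replaces + 4 char counts) by one greedy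
-- left-to-right pass counting both gallows kinds at once (objective: alternative, no intermediate strings).

-- ===== PORT A =====
def count_gallows_in_words (words : List String) : List (String × Int) :=
  let text := PySem.Str.join "." words
  let split : Int :=
    (["cth", "ckh", "cph", "cfh"] : List String).foldl
      (fun acc sg => acc + (PySem.Str.count text sg : Int)) 0
  let clean :=
    (["cth", "ckh", "cph", "cfh"] : List String).foldl
      (fun s sg => PySem.Str.replace s sg "___") text
  let simple : Int :=
    (["t", "k", "p", "f"] : List String).foldl
      (fun acc ch => acc + (PySem.Str.count clean ch : Int)) 0
  [("simple", simple), ("split", split), ("total_words", (words.length : Int))]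

-- ===== PORT B =====
-- module constants of Source B (on the char-list side)
def pvSplits : List (List Char) := [['c','t','h'], ['c','k','h'], ['c','p','h'], ['c','f','h']]
def pvSimples : List Char := ['t','k','p','f']

-- the while-loop of Source B: at each position, text[i:i+3] in ALL_SPLIT_GALLOWS consumes 3 chars,
-- otherwise one char (counted if a simple gallows)
def pvScan : List Char → Int → Int → Int × Int
  | [], simple, split => (simple, split)
  | c :: t, simple, split =>
    if pvSplits.contains (List.take 3 (c :: t)) then pvScan (List.drop 2 t) simple (split + 1)
    else if pvSimples.contains c then pvScan t (simple + 1) split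
    else pvScan t simple split
termination_by l _ _ => l.length
decreasing_by all_goals (simp; try omega)

def count_gallows_in_words_alt (words : List String) : List (String × Int) :=
  let text := PySem.Str.join "." words
  let r := pvScan text.toList 0 0
  [("simple", r.1), ("split", r.2), ("total_words", (words.length : Int))]

-- ===== PRECONDITION & SPEC =====
def Spec_count_gallows_in_words (words : List String) (out : List (String × Int)) : Prop := out = count_gallows_in_words_alt words
instance (words : List String) (out : List (String × Int)) : Decidable (Spec_count_gallows_in_words words out) := by unfold Spec_count_gallows_in_words; infer_instance

-- ===== CLAIM (what is proved, stated in full; the proofs are below) =====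
def Claim_equal_count_gallows_in_words : Prop := ∀ (words : List String), Dom_count_gallows_in_words words → Spec_count_gallows_in_words words (count_gallows_in_words words)

-- ===== LEMMAS AND PROOFS =====

-- recursive characterisations of Python's str.count / str.replace (PySem's fuel loops)
def myCount (sub : List Char) : List Char → Nat
  | [] => 0
  | c :: t => if sub.isPrefixOf (c :: t) then myCount sub (t.drop (sub.length - 1)) + 1 else myCount sub t
termination_by l => l.length
decreasing_by all_goals (simp; try omega)

def myRepl (old nw : List Char) : List Char → List Char
  | [] => []
  | c :: t => if old.isPrefixOf (c :: t) then nw ++ myRepl old nw (t.drop (old.length - 1)) else c :: myRepl old nw t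
termination_by l => l.length
decreasing_by all_goals (simp; try omega)

theorem count_go_eq (sub : List Char) (hsub : sub ≠ []) :
    ∀ (fuel : Nat) (l : List Char) (acc : Nat), l.length ≤ fuel →
      PySem.Chars.count.go sub fuel l acc = acc + myCount sub l := by
  intro fuel
  induction fuel with
  | zero =>
    intro l acc h
    have : l = [] := by
      cases l with
      | nil => rfl
      | cons c t => simp at h
    subst this
    simp [PySem.Chars.count.go, myCount]
  | succ n ih =>
    intro l acc h
    cases l with
    | nil => simp [PySem.Chars.count.go, myCount]
    | cons c t =>
      rw [PySem.Chars.count.go]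
      by_cases hp : sub.isPrefixOf (c :: t)
      · rw [if_pos hp]
        obtain ⟨m, hm⟩ : ∃ m, sub.length = m + 1 := by
          cases sub with
          | nil => exact absurd rfl hsub
          | cons a b => exact ⟨b.length, rfl⟩
        have hdrop : (c :: t).drop sub.length = t.drop (sub.length - 1) := by
          rw [hm]; simp
        rw [hdrop, ih _ _ (by simp at h ⊢; omega)]
        rw [myCount, if_pos hp]
        omega
      · rw [if_neg hp, ih _ _ (by simp at h; omega), myCount, if_neg hp]

theorem count_eq_myCount (l sub : List Char) (hsub : sub ≠ []) :
    PySem.Chars.count l sub = myCount sub l := by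
  rw [PySem.Chars.count, if_neg (by simpa using hsub)]
  simpa using count_go_eq sub hsub l.length l 0 le_rfl

theorem replace_go_eq (old nw : List Char) (hold : old ≠ []) :
    ∀ (fuel : Nat) (l acc : List Char), l.length ≤ fuel →
      PySem.Chars.replace.go old nw fuel l acc = acc.reverse ++ myRepl old nw l := by
  intro fuel
  induction fuel with
  | zero =>
    intro l acc h
    have : l = [] := by cases l with | nil => rfl | cons c t => simp at h
    subst this
    simp [PySem.Chars.replace.go, myRepl]
  | succ n ih =>
    intro l acc h
    cases l with
    | nil => simp [PySem.Chars.replace.go, myRepl]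
    | cons c t =>
      rw [PySem.Chars.replace.go]
      by_cases hp : old.isPrefixOf (c :: t)
      · rw [if_pos hp]
        obtain ⟨m, hm⟩ : ∃ m, old.length = m + 1 := by
          cases old with
          | nil => exact absurd rfl hold
          | cons a b => exact ⟨b.length, rfl⟩
        have hdrop : (c :: t).drop old.length = t.drop (old.length - 1) := by
          rw [hm]; simp
        rw [hdrop, ih _ _ (by simp at h ⊢; omega)]
        rw [myRepl, if_pos hp]
        simp
      · rw [if_neg hp, ih _ _ (by simp at h; omega), myRepl, if_neg hp]
        simp

theorem replace_eq_myRepl (l old nw : List Char) (hold : old ≠ []) :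
    PySem.Chars.replace l old nw = myRepl old nw l := by
  rw [PySem.Chars.replace, if_neg (by simpa using hold)]
  simpa using replace_go_eq old nw hold l.length l [] le_rfl

theorem myCount_singleton (x : Char) (l : List Char) : myCount [x] l = l.count x := by
  induction l with
  | nil => simp [myCount]
  | cons c t ih =>
    rw [myCount]
    by_cases hx : x = c
    · subst hx
      rw [if_pos (by simp [List.isPrefixOf])]
      simp [ih]
    · rw [if_neg (by simp [List.isPrefixOf]; exact Ne.intro hx)]
      simp [eq_comm, hx, ih]

-- A's masking composition and A's counts, as functions of the joined text
def usc : List Char := ['_','_','_']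
def maskA (l : List Char) : List Char :=
  myRepl ['c','f','h'] usc (myRepl ['c','p','h'] usc (myRepl ['c','k','h'] usc (myRepl ['c','t','h'] usc l)))
def cnt4 (m : List Char) : Nat := m.count 't' + m.count 'k' + m.count 'p' + m.count 'f'
def split4 (l : List Char) : Nat :=
  myCount ['c','t','h'] l + myCount ['c','k','h'] l + myCount ['c','p','h'] l + myCount ['c','f','h'] l

-- replace by ['c',m,'h'] neither creates nor destroys a later "gh"-prefix (g ∉ {'c','_'})
theorem prefixH_repl (m : Char) (u : List Char) :
    List.isPrefixOf ['h'] (myRepl ['c',m,'h'] usc u) = List.isPrefixOf ['h'] u := by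
  cases u with
  | nil => simp [myRepl]
  | cons b v =>
    rw [myRepl]
    by_cases hp : (['c',m,'h'] : List Char).isPrefixOf (b :: v)
    · rw [if_pos hp]
      have hb : b = 'c' := by
        simp [List.isPrefixOf] at hp
        exact hp.1.symm
      subst hb
      simp [usc, List.isPrefixOf]
    · rw [if_neg hp]
      simp [List.isPrefixOf]

theorem prefix2_repl (m g : Char) (hg1 : g ≠ 'c') (l : List Char) :
    List.isPrefixOf [g,'h'] (myRepl ['c',m,'h'] usc l) = List.isPrefixOf [g,'h'] l := by
  cases l with
  | nil => simp [myRepl]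
  | cons a u =>
    rw [myRepl]
    by_cases hp : (['c',m,'h'] : List Char).isPrefixOf (a :: u)
    · rw [if_pos hp]
      have ha : a = 'c' := by
        simp [List.isPrefixOf] at hp
        exact hp.1.symm
      subst ha
      simp [usc, List.isPrefixOf, hg1]
    · rw [if_neg hp]
      simp [List.isPrefixOf, prefixH_repl]

theorem tri_pass (m g : Char) (hmg : m ≠ g) (hgc : g ≠ 'c') (X : List Char) :
    myRepl ['c',m,'h'] usc ('c' :: g :: 'h' :: X) = 'c' :: g :: 'h' :: myRepl ['c',m,'h'] usc X := by
  rw [myRepl, if_neg (by simp [List.isPrefixOf]; intro h; exact absurd h hmg)]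
  rw [myRepl, if_neg (by simp [List.isPrefixOf]; intro h; exact absurd h.symm hgc)]
  rw [myRepl, if_neg (by simp [List.isPrefixOf])]

theorem tri_consume (g : Char) (X : List Char) :
    myRepl ['c',g,'h'] usc ('c' :: g :: 'h' :: X) = '_' :: '_' :: '_' :: myRepl ['c',g,'h'] usc X := by
  rw [myRepl, if_pos (by simp [List.isPrefixOf])]
  simp [usc]

theorem usc_pass (m : Char) (X : List Char) :
    myRepl ['c',m,'h'] usc ('_' :: '_' :: '_' :: X) = '_' :: '_' :: '_' :: myRepl ['c',m,'h'] usc X := by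
  rw [myRepl, if_neg (by simp [List.isPrefixOf])]
  rw [myRepl, if_neg (by simp [List.isPrefixOf])]
  rw [myRepl, if_neg (by simp [List.isPrefixOf])]

theorem maskA_pass (c : Char) (t : List Char)
    (h : ∀ pat ∈ pvSplits, ¬ pat.isPrefixOf (c :: t)) :
    maskA (c :: t) = c :: maskA t := by
  have h1 := h _ (show (['c','t','h'] : List Char) ∈ pvSplits by simp [pvSplits])
  have h2 := h _ (show (['c','k','h'] : List Char) ∈ pvSplits by simp [pvSplits])
  have h3 := h _ (show (['c','p','h'] : List Char) ∈ pvSplits by simp [pvSplits])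
  have h4 := h _ (show (['c','f','h'] : List Char) ∈ pvSplits by simp [pvSplits])
  unfold maskA
  have s1 : myRepl ['c','t','h'] usc (c :: t) = c :: myRepl ['c','t','h'] usc t := by
    rw [myRepl, if_neg h1]
  rw [s1]
  have s2 : myRepl ['c','k','h'] usc (c :: myRepl ['c','t','h'] usc t)
      = c :: myRepl ['c','k','h'] usc (myRepl ['c','t','h'] usc t) := by
    rw [myRepl, if_neg ?_]
    simp only [List.isPrefixOf, Bool.and_eq_true, prefix2_repl 't' 'k' (by decide)]
    intro hc
    exact h2 (by simpa [List.isPrefixOf] using hc)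
  rw [s2]
  have s3 : myRepl ['c','p','h'] usc (c :: myRepl ['c','k','h'] usc (myRepl ['c','t','h'] usc t))
      = c :: myRepl ['c','p','h'] usc (myRepl ['c','k','h'] usc (myRepl ['c','t','h'] usc t)) := by
    rw [myRepl, if_neg ?_]
    simp only [List.isPrefixOf, Bool.and_eq_true, prefix2_repl 'k' 'p' (by decide),
      prefix2_repl 't' 'p' (by decide)]
    intro hc
    exact h3 (by simpa [List.isPrefixOf] using hc)
  rw [s3]
  rw [myRepl, if_neg ?_]
  simp only [List.isPrefixOf, Bool.and_eq_true, prefix2_repl 'p' 'f' (by decide),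
    prefix2_repl 'k' 'f' (by decide), prefix2_repl 't' 'f' (by decide)]
  intro hc
  exact h4 (by simpa [List.isPrefixOf] using hc)

theorem maskA_split (g : Char) (hg : pvSimples.contains g) (v : List Char) :
    maskA ('c' :: g :: 'h' :: v) = '_' :: '_' :: '_' :: maskA v := by
  have hg' : g = 't' ∨ g = 'k' ∨ g = 'p' ∨ g = 'f' := by
    simpa [pvSimples] using hg
  unfold maskA
  rcases hg' with h | h | h | h <;> subst h
  · rw [tri_consume, usc_pass, usc_pass, usc_pass]
  · rw [tri_pass 't' 'k' (by decide) (by decide), tri_consume, usc_pass, usc_pass]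
  · rw [tri_pass 't' 'p' (by decide) (by decide), tri_pass 'k' 'p' (by decide) (by decide),
      tri_consume, usc_pass]
  · rw [tri_pass 't' 'f' (by decide) (by decide), tri_pass 'k' 'f' (by decide) (by decide),
      tri_pass 'p' 'f' (by decide) (by decide), tri_consume]

theorem split4_pass (c : Char) (t : List Char)
    (h : ∀ pat ∈ pvSplits, ¬ pat.isPrefixOf (c :: t)) :
    split4 (c :: t) = split4 t := by
  unfold split4
  rw [myCount, if_neg (h _ (by simp [pvSplits])), myCount, if_neg (h _ (by simp [pvSplits])),
    myCount, if_neg (h _ (by simp [pvSplits])), myCount, if_neg (h _ (by simp [pvSplits]))]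

theorem cnt_consume (g : Char) (X : List Char) :
    myCount ['c',g,'h'] ('c' :: g :: 'h' :: X) = myCount ['c',g,'h'] X + 1 := by
  rw [myCount, if_pos (by simp [List.isPrefixOf])]
  simp

theorem cnt_pass (m g : Char) (hmg : m ≠ g) (hgc : g ≠ 'c') (X : List Char) :
    myCount ['c',m,'h'] ('c' :: g :: 'h' :: X) = myCount ['c',m,'h'] X := by
  rw [myCount, if_neg (by simp [List.isPrefixOf]; intro h; exact absurd h hmg)]
  rw [myCount, if_neg (by simp [List.isPrefixOf]; intro h; exact absurd h.symm hgc)]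
  rw [myCount, if_neg (by simp [List.isPrefixOf])]

theorem split4_split (g : Char) (hg : pvSimples.contains g) (v : List Char) :
    split4 ('c' :: g :: 'h' :: v) = split4 v + 1 := by
  have hg' : g = 't' ∨ g = 'k' ∨ g = 'p' ∨ g = 'f' := by
    simpa [pvSimples] using hg
  unfold split4
  rcases hg' with h | h | h | h <;> subst h
  · rw [cnt_consume, cnt_pass 'k' 't' (by decide) (by decide),
      cnt_pass 'p' 't' (by decide) (by decide), cnt_pass 'f' 't' (by decide) (by decide)]
    omega
  · rw [cnt_consume, cnt_pass 't' 'k' (by decide) (by decide),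
      cnt_pass 'p' 'k' (by decide) (by decide), cnt_pass 'f' 'k' (by decide) (by decide)]
    omega
  · rw [cnt_consume, cnt_pass 't' 'p' (by decide) (by decide),
      cnt_pass 'k' 'p' (by decide) (by decide), cnt_pass 'f' 'p' (by decide) (by decide)]
    omega
  · rw [cnt_consume, cnt_pass 't' 'f' (by decide) (by decide),
      cnt_pass 'k' 'f' (by decide) (by decide), cnt_pass 'p' 'f' (by decide) (by decide)]
    omega

theorem pvScan_eq (n : Nat) :
    ∀ (l : List Char), l.length ≤ n → ∀ (s p : Int),
      pvScan l s p = (s + (cnt4 (maskA l) : Int), p + (split4 l : Int)) := by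
  induction n with
  | zero =>
    intro l hl s p
    have : l = [] := by cases l with | nil => rfl | cons c t => simp at hl
    subst this
    simp [pvScan, maskA, myRepl, cnt4, split4, myCount, usc]
  | succ n ih =>
    intro l hl s p
    cases l with
    | nil => simp [pvScan, maskA, myRepl, cnt4, split4, myCount, usc]
    | cons c t =>
      rw [pvScan]
      by_cases hm : pvSplits.contains (List.take 3 (c :: t))
      · rw [if_pos hm]
        rcases t with _ | ⟨b, _ | ⟨d, v⟩⟩
        · simp [pvSplits] at hm
        · simp [pvSplits] at hm
        · simp only [List.take, List.drop] at hm ⊢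
          have hm' : ([c,b,d] : List Char) = ['c','t','h'] ∨ ([c,b,d] : List Char) = ['c','k','h']
              ∨ ([c,b,d] : List Char) = ['c','p','h'] ∨ ([c,b,d] : List Char) = ['c','f','h'] := by
            simpa [pvSplits] using hm
          have hlen : v.length ≤ n := by simp at hl; omega
          rcases hm' with h | h | h | h <;>
            (injection h with h1 h; injection h with h2 h; injection h with h3 h;
             subst h1; subst h2; subst h3) <;>
          · rw [ih v hlen, maskA_split _ (by decide) v, split4_split _ (by decide) v]
            simp only [Prod.mk.injEq]
            refine ⟨?_, ?_⟩
            · simp [cnt4]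
            · push_cast; ring
      · rw [if_neg hm]
        have hnp : ∀ pat ∈ pvSplits, ¬ pat.isPrefixOf (c :: t) := by
          intro pat hpat hpre
          apply hm
          have h3 : pat.length = 3 := by
            rcases (by simpa [pvSplits] using hpat :
              pat = ['c','t','h'] ∨ pat = ['c','k','h'] ∨ pat = ['c','p','h'] ∨ pat = ['c','f','h'])
              with h | h | h | h <;> subst h <;> rfl
          have htake : List.take 3 (c :: t) = pat := by
            have hpre' : pat <+: (c :: t) := List.isPrefixOf_iff_prefix.mp hpre
            have := List.prefix_iff_eq_take.mp hpre'
            rw [this, h3]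
          rw [htake]
          simpa [List.contains_iff_mem] using hpat
        have hlen : t.length ≤ n := by simp at hl; omega
        rw [maskA_pass c t hnp, split4_pass c t hnp]
        by_cases hs : pvSimples.contains c
        · rw [if_pos hs, ih t hlen]
          have hc : c = 't' ∨ c = 'k' ∨ c = 'p' ∨ c = 'f' := by simpa [pvSimples] using hs
          rcases hc with h | h | h | h <;> subst h <;>
          · simp only [Prod.mk.injEq]
            refine ⟨?_, ?_⟩
            · simp [cnt4]; ring
            · trivial
        · rw [if_neg hs, ih t hlen]
          have hc : ¬ c = 't' ∧ ¬ c = 'k' ∧ ¬ c = 'p' ∧ ¬ c = 'f' := by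
            simpa [pvSimples] using hs
          simp only [Prod.mk.injEq]
          refine ⟨?_, ?_⟩
          · simp [cnt4, hc.1, hc.2.1, hc.2.2.1, hc.2.2.2]
          · trivial

-- ===== VERDICT (by name: the statement is the Claim_ definition above) =====
theorem count_gallows_in_words_spec : Claim_equal_count_gallows_in_words := by
  unfold Claim_equal_count_gallows_in_words Spec_count_gallows_in_words
  intro words _
  unfold count_gallows_in_words count_gallows_in_words_alt
  simp only [List.foldl]
  rw [pvScan_eq (PySem.Str.join "." words).toList.length _ le_rfl]
  have hrepl : ∀ (s : String) (old : List Char), old ≠ [] →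
      (PySem.Str.replace s (String.ofList old) (String.ofList usc)).toList = myRepl old usc s.toList := by
    intro s old h
    rw [PySem.Str.replace]
    simp only [String.toList_ofList]
    exact replace_eq_myRepl _ _ _ h
  have hcnt : ∀ (s : String) (sub : List Char), sub ≠ [] →
      PySem.Str.count s (String.ofList sub) = myCount sub s.toList := by
    intro s sub h
    rw [PySem.Str.count]
    simp only [String.toList_ofList]
    exact count_eq_myCount _ _ h
  have e1 : ("cth" : String) = String.ofList ['c','t','h'] := rfl
  have e2 : ("ckh" : String) = String.ofList ['c','k','h'] := rfl
  have e3 : ("cph" : String) = String.ofList ['c','p','h'] := rfl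
  have e4 : ("cfh" : String) = String.ofList ['c','f','h'] := rfl
  have e5 : ("___" : String) = String.ofList usc := rfl
  have et : ("t" : String) = String.ofList ['t'] := rfl
  have ek : ("k" : String) = String.ofList ['k'] := rfl
  have ep : ("p" : String) = String.ofList ['p'] := rfl
  have ef : ("f" : String) = String.ofList ['f'] := rfl
  rw [e1, e2, e3, e4, e5, et, ek, ep, ef]
  rw [hcnt _ ['c','t','h'] (by decide), hcnt _ ['c','k','h'] (by decide),
    hcnt _ ['c','p','h'] (by decide), hcnt _ ['c','f','h'] (by decide),
    hcnt _ ['t'] (by decide), hcnt _ ['k'] (by decide),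
    hcnt _ ['p'] (by decide), hcnt _ ['f'] (by decide)]
  rw [hrepl _ ['c','f','h'] (by decide), hrepl _ ['c','p','h'] (by decide),
    hrepl _ ['c','k','h'] (by decide), hrepl _ ['c','t','h'] (by decide)]
  have hmask : ∀ l : List Char,
      myRepl ['c','f','h'] usc (myRepl ['c','p','h'] usc (myRepl ['c','k','h'] usc (myRepl ['c','t','h'] usc l)))
        = maskA l := fun _ => rfl
  rw [hmask]
  simp only [myCount_singleton]
  simp only [List.cons.injEq, Prod.mk.injEq, and_true, true_and]
  refine ⟨?_, ?_⟩
  · simp only [cnt4]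
    push_cast
    ring
  · simp only [split4]
    push_cast
    ring
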